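-- pv_equiv track=rewrite | github.com/SocialFinanceDigitalLabs/AdventOfCode | solutions/2020/celine/day14/day14.py | generate
-- ===== SOURCE A (Python) =====
-- def generate(index):
--     # Base case
--     if 'X' not in index:
--         return [index]
--     # Other cases
--     x = index.find('X')
--     string1 = index[:x] + '0' + index[x+1:]
--     string2 = index[:x] + '1' + index[x+1:]
--     branch1 = generate(string1)
--     branch2 = generate(string2)
--     return branch1 + branch2
-- ===== SOURCE B (Python) =====
-- def generate(index):
--     # Iterative single pass: grow all prefixes left-to-right, branching at each 'X'.
--     results = ['']
--     for c in index:
--         if c == 'X':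
--             results = [r + b for r in results for b in '01']
--         else:
--             results = [r + c for r in results]
--     return results
-- ===== Notes on version B (the rewrite author's own statement) =====
-- stated objective: simpler
-- what changed: A recursively locates the first wildcard, splices in each bit and concatenates the two recursive expansions; B makes one iterative left-to-right pass over the characters, keeping the list of all expanded prefixes and branching it at each wildcard.
import Mathlib
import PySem

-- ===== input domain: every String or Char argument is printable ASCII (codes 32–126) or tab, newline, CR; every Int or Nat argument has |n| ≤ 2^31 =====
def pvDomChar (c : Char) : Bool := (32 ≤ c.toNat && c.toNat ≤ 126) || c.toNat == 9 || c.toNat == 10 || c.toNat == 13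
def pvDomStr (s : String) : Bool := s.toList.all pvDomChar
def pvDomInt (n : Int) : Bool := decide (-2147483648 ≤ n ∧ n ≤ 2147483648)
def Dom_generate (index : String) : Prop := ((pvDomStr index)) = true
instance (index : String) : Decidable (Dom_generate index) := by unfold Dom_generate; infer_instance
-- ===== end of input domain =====

-- B replaces A's find/slice recursion by a single left-to-right fold that branches at each 'X'; objective: simpler.


-- ===== PORT A =====
-- Facts about the first 'X' (position x = index.find('X')): used by the port's termination proof and the equivalence proof.
theorem find_X_decomp (cs : List Char) (h : ¬ PySem.Chars.isIn ['X'] cs = false) :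
    0 ≤ PySem.Chars.find cs ['X'] ∧
    'X' ∉ cs.take (PySem.Chars.find cs ['X']).toNat ∧
    cs = cs.take (PySem.Chars.find cs ['X']).toNat ++
         'X' :: cs.drop ((PySem.Chars.find cs ['X']).toNat + 1) := by
  have h1 : ['X'] <:+: cs := by
    have ht : PySem.Chars.isIn ['X'] cs = true := by
      revert h; cases PySem.Chars.isIn ['X'] cs <;> simp
    exact (PySem.Chars.isIn_iff_infix _ _).mp ht
  have hnn : 0 ≤ PySem.Chars.find cs ['X'] := (PySem.Chars.find_nonneg_iff _ _).mpr h1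
  obtain ⟨hpre, hmin⟩ := PySem.Chars.find_spec hnn
  refine ⟨hnn, ?_, ?_⟩
  · intro hmem
    obtain ⟨i, hi, hgi⟩ := List.getElem_of_mem hmem
    have hi' : i < cs.length := by simp at hi; omega
    have hix : i < (PySem.Chars.find cs ['X']).toNat := by simp at hi; omega
    have hcsi : cs[i] = 'X' := by rw [← List.getElem_take (h := hi)] ; exact hgi
    exact hmin i hix ⟨cs.drop (i + 1), by
      rw [List.singleton_append, ← hcsi]; exact (List.drop_eq_getElem_cons hi').symm⟩
  · obtain ⟨t, ht⟩ := hpre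
    have hdx : cs.drop (PySem.Chars.find cs ['X']).toNat = 'X' :: t := by
      simpa using ht.symm
    have htt : t = cs.drop ((PySem.Chars.find cs ['X']).toNat + 1) := by
      rw [← List.tail_drop, hdx]; rfl
    rw [← htt, ← hdx, List.take_append_drop]

-- A's recursion, transliterated on the code points: if 'X' not in index: return [index];
-- else x = index.find('X'); string1 = index[:x]+'0'+index[x+1:]; string2 = index[:x]+'1'+index[x+1:];
-- return generate(string1) + generate(string2).
def generateA (cs : List Char) : List (List Char) :=
  if h : PySem.Chars.isIn ['X'] cs = false then [cs]
  else
    let x := PySem.Chars.find cs ['X']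
    let string1 := PySem.Chars.slice cs none (some x) ++ ['0'] ++ PySem.Chars.slice cs (some (x + 1)) none
    let string2 := PySem.Chars.slice cs none (some x) ++ ['1'] ++ PySem.Chars.slice cs (some (x + 1)) none
    generateA string1 ++ generateA string2
termination_by cs.count 'X'
decreasing_by
  all_goals
  · obtain ⟨hnn, -, hdec⟩ := find_X_decomp cs h
    have h1 : (PySem.Chars.find cs ['X'] + 1).toNat = (PySem.Chars.find cs ['X']).toNat + 1 := by omega
    simp only [PySem.Chars.slice_eq_listSlice, PySem.List.slice_to _ hnn,
      PySem.List.slice_from _ (by omega : (0:Int) ≤ PySem.Chars.find cs ['X'] + 1), h1]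
    conv_rhs => rw [hdec]
    simp [List.count_append]

def generate (index : String) : List String :=
  (generateA index.toList).map String.ofList

-- ===== PORT B =====
-- B's loop body: branch the accumulated prefixes on 'X', else append the character.
def stepB (acc : List (List Char)) (c : Char) : List (List Char) :=
  if c = 'X' then acc.flatMap (fun r => ['0', '1'].map (fun b => r ++ [b]))
  else acc.map (fun r => r ++ [c])

def generate_alt (index : String) : List String :=
  (index.toList.foldl stepB [[]]).map String.ofList

-- ===== PRECONDITION & SPEC =====
def Spec_generate (index : String) (out : List String) : Prop := out = generate_alt index
instance (index : String) (out : List String) : Decidable (Spec_generate index out) := by unfold Spec_generate; infer_instance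

-- ===== CLAIM (what is proved, stated in full; the proofs are below) =====
def Claim_equal_generate : Prop := ∀ (index : String), Dom_generate index → Spec_generate index (generate index)

-- ===== LEMMAS AND PROOFS =====

theorem foldB_shift (cs : List Char) :
    ∀ acc, cs.foldl stepB acc = acc.flatMap (fun r => (cs.foldl stepB [[]]).map (r ++ ·)) := by
  induction cs with
  | nil => intro acc; simp
  | cons c cs ih =>
    intro acc
    rw [List.foldl_cons, ih (stepB acc c), List.foldl_cons, ih (stepB [[]] c)]
    by_cases hc : c = 'X' <;>
      simp [stepB, hc, List.flatMap_assoc, List.flatMap_map, List.map_map, Function.comp_def,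
        List.append_assoc]

theorem foldB_cons_ne (c : Char) (cs : List Char) (hc : c ≠ 'X') :
    (c :: cs).foldl stepB [[]] = (cs.foldl stepB [[]]).map (c :: ·) := by
  rw [List.foldl_cons, foldB_shift]
  simp [stepB, hc]

theorem foldB_cons_X (cs : List Char) :
    ('X' :: cs).foldl stepB [[]] =
      (cs.foldl stepB [[]]).map ('0' :: ·) ++ (cs.foldl stepB [[]]).map ('1' :: ·) := by
  rw [List.foldl_cons, foldB_shift]
  simp [stepB]

theorem foldB_append_noX (p : List Char) (cs : List Char) (hp : 'X' ∉ p) :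
    (p ++ cs).foldl stepB [[]] = (cs.foldl stepB [[]]).map (p ++ ·) := by
  induction p with
  | nil => simp
  | cons c p ih =>
    have hc : c ≠ 'X' := fun hcx => hp (hcx ▸ List.mem_cons_self)
    have hp' : 'X' ∉ p := fun hm => hp (List.mem_cons_of_mem _ hm)
    rw [List.cons_append, foldB_cons_ne c _ hc, ih hp', List.map_map]
    rfl

theorem foldB_noX (cs : List Char) (hp : 'X' ∉ cs) : cs.foldl stepB [[]] = [cs] := by
  have := foldB_append_noX cs [] hp
  simpa using this

theorem generateA_eq_foldB (cs : List Char) : generateA cs = cs.foldl stepB [[]] := by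
  induction hn : cs.count 'X' using Nat.strong_induction_on generalizing cs with
  | _ n ih =>
  rw [generateA]
  split
  · rename_i h
    have hnoX : 'X' ∉ cs := by
      have := (PySem.Chars.isIn_eq_false_iff _ _).mp h
      rw [List.singleton_infix_iff] at this
      exact this
    rw [foldB_noX cs hnoX]
  · rename_i h
    obtain ⟨hnn, htake, hdec⟩ := find_X_decomp cs h
    set x := (PySem.Chars.find cs ['X']).toNat with hx
    have h1 : (PySem.Chars.find cs ['X'] + 1).toNat = x + 1 := by omega
    simp only [PySem.Chars.slice_eq_listSlice, PySem.List.slice_to _ hnn,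
      PySem.List.slice_from _ (by omega : (0:Int) ≤ PySem.Chars.find cs ['X'] + 1), h1, ← hx]
    set p := cs.take x with hpdef
    set s := cs.drop (x + 1) with hsdef
    have hcnt : cs.count 'X' = p.count 'X' + 1 + s.count 'X' := by
      conv_lhs => rw [hdec]
      simp [List.count_append]
      omega
    have hc0 : (p ++ ['0'] ++ s).count 'X' < n := by
      simp only [List.count_append]
      simp
      omega
    have hc1 : (p ++ ['1'] ++ s).count 'X' < n := by
      simp only [List.count_append]
      simp
      omega
    rw [ih _ hc0 _ rfl, ih _ hc1 _ rfl]
    have e0 : p ++ ['0'] ++ s = p ++ '0' :: s := by simp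
    have e1 : p ++ ['1'] ++ s = p ++ '1' :: s := by simp
    rw [e0, e1, foldB_append_noX p _ htake, foldB_append_noX p _ htake]
    conv_rhs => rw [hdec]
    rw [foldB_append_noX p _ htake, foldB_cons_X,
      foldB_cons_ne '0' s (by decide), foldB_cons_ne '1' s (by decide)]
    simp [List.map_map, Function.comp_def]

-- ===== VERDICT (by name: the statement is the Claim_ definition above) =====
theorem generate_spec : Claim_equal_generate := by
  intro index _
  unfold Spec_generate generate generate_alt
  rw [generateA_eq_foldB]
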